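-- pv_equiv track=rewrite | github.com/Brijesh1656/Math-Professor-Ai | rag_pipeline/semantic_chunker.py | _group_sentences
-- ===== SOURCE A (Python) =====
-- from typing import List, Dict, Tuple, Optional
--
-- def _group_sentences(
--
--     sentences: List[Tuple[str, int, int]],
--     topic_shifts: List[int]
-- ) -> List[List[Tuple[str, int, int]]]:
--     """
--     Group sentences into semantic units based on topic shifts.
--     """
--     if not sentences:
--         return []
--
--     units = []
--     current_unit = [sentences[0]]
--
--     for i in range(1, len(sentences)):
--         if i in topic_shifts:
--             # Start a new unit
--             if current_unit:
--                 units.append(current_unit)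
--             current_unit = [sentences[i]]
--         else:
--             # Add to current unit
--             current_unit.append(sentences[i])
--
--     # Add the last unit
--     if current_unit:
--         units.append(current_unit)
--
--     return units
-- ===== SOURCE B (Python) =====
-- def _group_sentences(sentences, topic_shifts):
--     if not sentences:
--         return []
--     bounds = [i for i in range(1, len(sentences)) if i in topic_shifts]
--     units = []
--     prev = 0
--     for b in bounds:
--         units.append(sentences[prev:b])
--         prev = b
--     units.append(sentences[prev:])
--     return units
-- ===== Notes on version B (the rewrite author's own statement) =====
-- stated objective: alternative
-- what changed: B computes the sorted boundary index list first, then builds each unit by slicing sentences[prev:b] in a second pass, instead of A's single pass that accumulates a current unit element by element.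
import Mathlib
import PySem

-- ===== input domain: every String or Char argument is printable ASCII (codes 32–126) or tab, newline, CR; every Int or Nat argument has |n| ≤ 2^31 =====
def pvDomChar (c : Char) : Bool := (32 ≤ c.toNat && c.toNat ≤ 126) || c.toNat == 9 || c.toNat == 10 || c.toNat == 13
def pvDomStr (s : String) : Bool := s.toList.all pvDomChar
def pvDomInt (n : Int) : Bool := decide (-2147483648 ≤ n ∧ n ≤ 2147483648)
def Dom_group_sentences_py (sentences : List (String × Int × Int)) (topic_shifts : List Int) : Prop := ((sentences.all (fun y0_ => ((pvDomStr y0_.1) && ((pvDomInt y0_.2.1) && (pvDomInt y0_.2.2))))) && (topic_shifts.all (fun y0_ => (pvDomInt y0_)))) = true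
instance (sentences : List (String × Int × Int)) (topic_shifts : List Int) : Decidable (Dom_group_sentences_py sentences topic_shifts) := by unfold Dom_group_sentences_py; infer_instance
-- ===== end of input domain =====

-- B replaces A's incremental per-element accumulation with a two-pass boundary-slicing
-- decomposition (collect boundary indices, then slice); objective: alternative (same cost).

-- ===== PORT A =====
-- loop body of A's for-loop, as a named helper
def pvStepA (ts : List Int) (s : List (String × Int × Int)) (s0 : String × Int × Int)
    (st : List (List (String × Int × Int)) × List (String × Int × Int)) (i : Int) :
    List (List (String × Int × Int)) × List (String × Int × Int) :=
  if ts.contains i then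
    ((if st.2 ≠ [] then st.1 ++ [st.2] else st.1), [PySem.List.pyGetD s i s0])
  else
    (st.1, st.2 ++ [PySem.List.pyGetD s i s0])

def group_sentences_py (sentences : List (String × Int × Int)) (topic_shifts : List Int) : List (List (String × Int × Int)) :=
  match sentences with
  | [] => []
  | s0 :: rest =>
    let st := (PySem.List.pyRange 1 (((s0 :: rest).length : Int)) 1).foldl
      (pvStepA topic_shifts (s0 :: rest) s0) ([], [s0])
    if st.2 ≠ [] then st.1 ++ [st.2] else st.1

-- ===== PORT B =====
-- loop body of B's slicing loop, as a named helper
def pvStepB (s : List (String × Int × Int))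
    (st : List (List (String × Int × Int)) × Int) (b : Int) :
    List (List (String × Int × Int)) × Int :=
  (st.1 ++ [PySem.List.slice s (some st.2) (some b)], b)

def group_sentences_py_alt (sentences : List (String × Int × Int)) (topic_shifts : List Int) : List (List (String × Int × Int)) :=
  if sentences = [] then []
  else
    let bounds := (PySem.List.pyRange 1 ((sentences.length : Int)) 1).filter
      (fun i => topic_shifts.contains i)
    let st := bounds.foldl (pvStepB sentences) ([], 0)
    st.1 ++ [PySem.List.slice sentences (some st.2) none]

-- ===== PRECONDITION & SPEC =====
def Spec_group_sentences_py (sentences : List (String × Int × Int)) (topic_shifts : List Int) (out : List (List (String × Int × Int))) : Prop := out = group_sentences_py_alt sentences topic_shifts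
instance (sentences : List (String × Int × Int)) (topic_shifts : List Int) (out : List (List (String × Int × Int))) : Decidable (Spec_group_sentences_py sentences topic_shifts out) := by unfold Spec_group_sentences_py; infer_instance

-- ===== CLAIM (what is proved, stated in full; the proofs are below) =====
def Claim_equal_group_sentences_py : Prop := ∀ (sentences : List (String × Int × Int)) (topic_shifts : List Int), Dom_group_sentences_py sentences topic_shifts → Spec_group_sentences_py sentences topic_shifts (group_sentences_py sentences topic_shifts)

-- ===== LEMMAS AND PROOFS =====

-- Loop invariant: after processing indices 1..k-1, A's (units, current_unit) equals
-- B's partial (units, prev) with current_unit = sentences[prev:k].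
theorem pv_inv (ts : List Int) (s0 : String × Int × Int) (rest : List (String × Int × Int)) :
    ∀ k : Nat, 1 ≤ k → k ≤ rest.length + 1 →
    ∃ p : Nat,
      (((PySem.List.pyRange 1 (k : Int) 1).filter (fun i => ts.contains i)).foldl
          (pvStepB (s0 :: rest)) ([], 0)).2 = (p : Int) ∧
      p < k ∧
      ((PySem.List.pyRange 1 (k : Int) 1).foldl (pvStepA ts (s0 :: rest) s0) ([], [s0])).1 =
        (((PySem.List.pyRange 1 (k : Int) 1).filter (fun i => ts.contains i)).foldl
          (pvStepB (s0 :: rest)) ([], 0)).1 ∧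
      ((PySem.List.pyRange 1 (k : Int) 1).foldl (pvStepA ts (s0 :: rest) s0) ([], [s0])).2 =
        ((s0 :: rest).drop p).take (k - p) := by
  intro k
  induction k with
  | zero => intro h; omega
  | succ k ih =>
    intro _ hk1
    by_cases hk0 : k = 0
    · subst hk0
      refine ⟨0, ?_, ?_, ?_, ?_⟩ <;>
        simp [PySem.List.pyRange_one_eq_nil (le_refl (1:Int))]
    · have hk : 1 ≤ k := Nat.one_le_iff_ne_zero.mpr hk0
      have hklen : k < (s0 :: rest).length := by simp; omega
      obtain ⟨p, hp, hpk, h1, h2⟩ := ih hk (by omega)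
      simp only [List.contains_eq_mem] at hp h1 h2
      have hrange : PySem.List.pyRange 1 ((k + 1 : Nat) : Int) 1
          = PySem.List.pyRange 1 (k : Int) 1 ++ [(k : Int)] := by
        have : ((k + 1 : Nat) : Int) = (k : Int) + 1 := by push_cast; ring
        rw [this, PySem.List.pyRange_one_succ_right (by exact_mod_cast hk)]
      have hget : PySem.List.pyGetD (s0 :: rest) (k : Int) s0 = (s0 :: rest)[k] := by
        rw [PySem.List.pyGetD_natCast, List.getD_eq_getElem _ _ hklen]
      have hlen2 : (((s0 :: rest).drop p).take (k - p)).length = k - p := by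
        simp [List.length_take, List.length_drop]
        omega
      have hne : ((s0 :: rest).drop p).take (k - p) ≠ [] := by
        intro h
        rw [h] at hlen2
        simp at hlen2
        omega
      have hext : ((s0 :: rest).drop p).take (k - p) ++ [(s0 :: rest)[k]]
          = ((s0 :: rest).drop p).take (k + 1 - p) := by
        rw [show k + 1 - p = (k - p) + 1 by omega, List.take_add_one]
        have : ((s0 :: rest).drop p)[k - p]? = some (s0 :: rest)[k] := by
          rw [List.getElem?_drop, show p + (k - p) = k by omega,
            List.getElem?_eq_getElem hklen]
        rw [this]
        rfl
      rw [hrange]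
      by_cases hc' : ((k : Int) ∈ ts)
      · have hc : ts.contains (k : Int) = true := by simpa using hc'
        refine ⟨k, ?_, by omega, ?_, ?_⟩
        · simp [List.filter_append, List.foldl_append, pvStepB, hc']
        · simp [List.filter_append, List.foldl_append, pvStepA, pvStepB, hc, hc', hne, h1, h2,
            hp, PySem.List.slice_natCast]
        · simp [List.filter_append, List.foldl_append, pvStepA, pvStepB, hc, hc', hne, hget]
          rw [List.drop_eq_getElem_cons hklen]
          simp
      · have hc : ¬ ts.contains (k : Int) = true := by simpa using hc'
        refine ⟨p, ?_, by omega, ?_, ?_⟩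
        · simp [List.filter_append, List.foldl_append, hc', hp]
        · simp [List.filter_append, List.foldl_append, pvStepA, hc', h1]
        · simp [List.foldl_append, pvStepA, hc', h2, hget]
          rw [← hext, ← h2]

theorem group_sentences_py_spec : Claim_equal_group_sentences_py := by
  unfold Claim_equal_group_sentences_py Spec_group_sentences_py
  intro s ts _
  match s with
  | [] => rfl
  | s0 :: rest =>
    obtain ⟨p, hp, hpk, h1, h2⟩ := pv_inv ts s0 rest (rest.length + 1) (by omega) (le_refl _)
    simp only [List.contains_eq_mem] at hp h1 h2
    have hcast : (((s0 :: rest).length : Int)) = ((rest.length + 1 : Nat) : Int) := by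
      simp
    have hlenp : ((s0 :: rest).drop p).length ≤ rest.length + 1 - p := by
      simp [List.length_drop]
    have htake : ((s0 :: rest).drop p).take (rest.length + 1 - p)
        = (s0 :: rest).drop p := List.take_of_length_le hlenp
    have hdne : (s0 :: rest).drop p ≠ [] := by
      intro h
      have := congrArg List.length h
      simp at this
      omega
    simp only [group_sentences_py, group_sentences_py_alt, hcast]
    rw [if_neg (by simp : ¬(s0 :: rest) = [])]
    simp only [List.contains_eq_mem]
    push_cast at hp h1 h2 ⊢
    rw [h2, htake, if_pos hdne, h1, hp, PySem.List.slice_from_natCast]
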